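-- pv_equiv track=rewrite | github.com/Evangeline-T/6.009-1-solution | lab3/lab.py | movies_between_actors
-- ===== SOURCE A (Python) =====
-- def BFS(data, start_point, goal_function):
--     """
--     Parameters :
--         data : Data that has been transformed using transform_data.
--
--         start_point : The actor ID that we are beginning our BFS on.
--
--         goal_function : The test we are using to determine whether we have met
--                         the end condition.
--
--     Returns :
--         Returns a list of the path from the start point to the ID that met the
--         end condition. If condition is never met, return None.
--
--     """
--
--     useful_data = data[0]
--     to_visit = [start_point]
--     parents = {start_point: None}                                              #Create a dictionary so that every actor ID is a child of a former actor.
--     visited = parents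
--     i = 0                                                                      #Initialize i for this while loop to improve runtime.
--
--     if goal_function(start_point):                                             #Check if the condition is met initially
--         return [start_point]
--
--     while i < len(to_visit):                                                   #i has to be less than the length of to_visit, if not, then we have visited all possible nodes and not found a path.
--         current_actor = to_visit[i]
--         i += 1
--
--         for neighbour in useful_data.get(current_actor, set()):
--             if goal_function(neighbour):                                       #Check if goal is met
--                 path = [current_actor, neighbour]
--
--                 intermediate = current_actor
--
--                 while parents[intermediate] != None:                           #Trackback through the parents dictionary and find the path to the actor .
--                     path.insert(0, parents[intermediate])
--                     intermediate = parents[intermediate]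
--                 return path
--
--             if neighbour not in visited:
--                 to_visit.append(neighbour)                                     #Append the neighbours of the current actor so that they get visited later.
--                 parents[neighbour] = current_actor                             #Add to the dictionary such that each key is the parent to the current actor.
--     return None
--
-- def actor_to_actor_path(data, actor_id_1, actor_id_2):
--     """
--     Parameters:
--         data : Data that has been transformed using transform_data.
--
--         actor_id_1 : An actor ID.
--
--         actor_id_2 : The other actor we are checking to see if a path exists
--                      with actor_id_1
--
--     Returns:
--         Returns the path in a list type from actor_id_1 to actor_id_2,
--         if it doens't exist, Return None.
--
--     """
--
--     return BFS(data, actor_id_1, lambda p: p == actor_id_2)                    #For our lambda function, we check if the actor id 1 is equal to actor id 2.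
--
-- def movies_between_actors(data, actor_id_1, actor_id_2):
--     """
--     Parameters:
--         data : Data that has been transformed using transform_data.
--
--         actor_id_1 : An actor ID.
--
--         actor_id_2 : The other actor we are checking to see that actor_id_1
--                      has a path of films to.
--
--     Returns:
--         A sequence of films in a list that represent the path from actor_id_1 to
--         actor_id_2. If it doesn't exist, return None.
--     """
--     movie_data = data[1]
--
--     actor_to_actor = actor_to_actor_path(data, actor_id_1, actor_id_2)
--
--     if actor_to_actor == None:                                                 #We know if actor_to_actor does not exist, then there cannot be a possible path of films.
--         return None
--
--     movie_sequence = []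
--
--     for i in range(len(actor_to_actor) - 1):
--         for movie in movie_data:
--             if actor_to_actor[i] in movie_data[movie] and actor_to_actor[i + 1] in movie_data[movie]:
--                 movie_sequence.append(movie)
--     return movie_sequence
-- ===== SOURCE B (Python) =====
-- def movies_between_actors(data, actor_id_1, actor_id_2):
--     adjacency, movie_data = data
--     films_of = {}
--     for movie, cast in movie_data.items():
--         for actor in cast:
--             films_of.setdefault(actor, []).append(movie)
--     path = _actor_path(adjacency, actor_id_1, actor_id_2)
--     if path is None:
--         return None
--     films = []
--     for a, b in zip(path, path[1:]):
--         films += [m for m in films_of.get(a, []) if b in movie_data[m]]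
--     return films
--
--
-- def _actor_path(adjacency, start, goal):
--     if goal == start:
--         return [start]
--     parent = {start: None}
--     pending = [start]
--     while pending:
--         u = pending.pop(0)
--         neighbours = adjacency.get(u, ())
--         if goal in neighbours:
--             return _chain(parent, u) + [goal]
--         for v in neighbours:
--             if v not in parent:
--                 parent[v] = u
--                 pending.append(v)
--     return None
--
--
-- def _chain(parent, u):
--     p = parent[u]
--     if p is None:
--         return [u]
--     return _chain(parent, p) + [u]
-- ===== Notes on version B (the rewrite author's own statement) =====
-- stated objective: alternative
-- what changed: B precomputes an actor-to-ordered-movie-list index once and, per consecutive path pair, filters only the first actor's own movies instead of A's scan over every movie for every pair; the BFS is restructured as a pop-from-front pending list with a per-node goal-membership test (instead of A's per-neighbour goal check inside an indexed queue loop) and the path is rebuilt by structural recursion on the parent chain instead of insert(0, ...). On the generated timing inputs (BFS-dominated) this measured no speed-up, so no speed is claimed.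
import Mathlib
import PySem

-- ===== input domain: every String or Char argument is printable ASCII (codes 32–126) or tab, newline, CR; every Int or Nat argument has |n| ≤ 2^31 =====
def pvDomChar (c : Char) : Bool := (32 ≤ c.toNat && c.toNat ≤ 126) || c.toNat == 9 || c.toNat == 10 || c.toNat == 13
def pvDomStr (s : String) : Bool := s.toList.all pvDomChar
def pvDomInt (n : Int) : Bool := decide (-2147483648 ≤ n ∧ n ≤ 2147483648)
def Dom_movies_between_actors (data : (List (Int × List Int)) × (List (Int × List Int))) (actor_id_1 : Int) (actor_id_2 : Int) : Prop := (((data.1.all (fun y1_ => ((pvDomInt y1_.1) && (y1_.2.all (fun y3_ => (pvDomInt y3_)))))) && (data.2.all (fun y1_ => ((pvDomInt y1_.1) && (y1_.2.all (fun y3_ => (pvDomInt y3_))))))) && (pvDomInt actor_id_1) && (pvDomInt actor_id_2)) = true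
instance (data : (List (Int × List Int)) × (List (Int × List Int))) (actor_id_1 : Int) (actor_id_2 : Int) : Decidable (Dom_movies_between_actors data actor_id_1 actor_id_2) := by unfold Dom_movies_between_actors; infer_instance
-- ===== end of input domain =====

-- B replaces A's per-pair scan over EVERY movie by a precomputed actor→movie-list index, and
-- restructures the BFS: a pop-from-front pending list with a per-node goal-membership test
-- (A checks goal per neighbour inside an indexed queue loop) and a recursive parent-chain
-- rebuild instead of insert(0, …). Both Pythons receive dicts of SETS; the ports read each
-- set as its distinct-element list under the convention.

-- ===== PORT A =====
-- `while parents[intermediate] != None: path.insert(0, parents[intermediate]); …`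
-- (fuel `p.items.length` bounds the parent chain, which never revisits a key; getD is
-- exact because every walked key is a key of `parents`)
def pvAWalk (p : PySem.Dict Int (Option Int)) : Nat → Int → List Int → List Int
  | 0, _, path => path
  | f+1, x, path =>
    match p.getD x none with
    | none => path
    | some q => pvAWalk p f q (q :: path)

-- `for neighbour in useful_data.get(current_actor, set()): …` — returns an early path or
-- the updated (to_visit, parents) state (`visited` IS `parents` in A)
def pvAScan (goal cur : Int) : List Int → List Int → PySem.Dict Int (Option Int) →
    Option (List Int) × List Int × PySem.Dict Int (Option Int)
  | [], q, p => (none, q, p)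
  | v :: vs, q, p =>
    if v = goal then
      (some (pvAWalk p p.items.length cur [cur, v]), q, p)
    else if p.contains v then
      pvAScan goal cur vs q p
    else
      pvAScan goal cur vs (q ++ [v]) (p.insert v (some cur))

-- `while i < len(to_visit): …` (fuel decreases once per iteration; the caller passes more
-- fuel than the queue can ever grow to, so fuel exhaustion is unreachable)
def pvABfs (adj : PySem.Dict Int (List Int)) (goal : Int) :
    Nat → List Int → Nat → PySem.Dict Int (Option Int) → Option (List Int)
  | 0, _, _, _ => none
  | f+1, q, i, p =>
    if i < q.length then
      match pvAScan goal (q.getD i 0) (adj.getD (q.getD i 0) []) q p with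
      | (some path, _, _) => some path
      | (none, q', p') => pvABfs adj goal f q' (i+1) p'
    else none

def movies_between_actors (data : (List (Int × List Int)) × (List (Int × List Int))) (actor_id_1 : Int) (actor_id_2 : Int) : Option (List Int) :=
  let useful := PySem.Dict.ofList data.1
  let md := PySem.Dict.ofList data.2
  -- BFS(data, actor_id_1, goal_function = (· == actor_id_2)); the up-front goal check is
  -- `if goal_function(start_point): return [start_point]`
  let atoa : Option (List Int) :=
    if actor_id_1 = actor_id_2 then some [actor_id_1]
    else pvABfs useful actor_id_2 (useful.values.foldl (fun n l => n + l.length) 2)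
      [actor_id_1] 0 (PySem.Dict.ofList [(actor_id_1, none)])
  match atoa with
  | none => none
  | some path =>
    -- for i in range(len(path)-1): for movie in movie_data: if both in movie_data[movie]: append
    some ((PySem.List.pyRange 0 (PySem.List.len path - 1) 1).foldl (fun seq i =>
      md.keys.foldl (fun seq m =>
        if PySem.List.pyGetD path i 0 ∈ md.getD m [] ∧ PySem.List.pyGetD path (i+1) 0 ∈ md.getD m []
        then seq ++ [m] else seq) seq) [])

-- ===== PORT B =====
-- `_chain(parent, u): p = parent[u]; if p is None: return [u]; return _chain(parent, p) + [u]`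
-- (fuel bounds the recursion depth; getD is exact: every call is on a key of `parent`)
def pvBChain (p : PySem.Dict Int (Option Int)) : Nat → Int → List Int
  | 0, u => [u]
  | f+1, u =>
    match p.getD u none with
    | none => [u]
    | some q => pvBChain p f q ++ [u]

-- `while pending: u = pending.pop(0); ns = adjacency.get(u, ()); if goal in ns: return
--  _chain(parent, u) + [goal]; for v in ns: if v not in parent: parent[v] = u; pending.append(v)`
-- (one fuel unit per popped node; the caller's fuel exceeds any possible number of pops)
def pvBBfs (adj : PySem.Dict Int (List Int)) (goal : Int) :
    Nat → List Int → PySem.Dict Int (Option Int) → Option (List Int)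
  | 0, _, _ => none
  | _+1, [], _ => none
  | f+1, u :: rest, p =>
    let ns := adj.getD u []
    if goal ∈ ns then some (pvBChain p p.items.length u ++ [goal])
    else
      let s := ns.foldl (fun s v =>
        if s.2.contains v then s else (s.1 ++ [v], s.2.insert v (some u))) (rest, p)
      pvBBfs adj goal f s.1 s.2

-- _actor_path(adjacency, start, goal)
def pvBBfsPath (adj : PySem.Dict Int (List Int)) (start goal : Int) (fuel : Nat) : Option (List Int) :=
  if goal = start then some [start]
  else pvBBfs adj goal fuel [start] (PySem.Dict.ofList [(start, none)])

def movies_between_actors_alt (data : (List (Int × List Int)) × (List (Int × List Int))) (actor_id_1 : Int) (actor_id_2 : Int) : Option (List Int) :=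
  let adjacency := PySem.Dict.ofList data.1
  let md := PySem.Dict.ofList data.2
  -- films_of: for movie, cast in movie_data.items(): for actor in cast: setdefault-append
  -- (cast is a Python set: iterate its distinct elements)
  let filmsOf := md.items.foldl (fun d mc =>
    (PySem.Set.ofList mc.2).foldl (fun d a => d.modify a ([] : List Int) (fun l => l ++ [mc.1])) d)
    PySem.Dict.empty
  match pvBBfsPath adjacency actor_id_1 actor_id_2 (adjacency.values.foldl (fun n l => n + l.length) 2) with
  | none => none
  | some path =>
    -- for a, b in zip(path, path[1:]): films += [m for m in films_of.get(a, []) if b in movie_data[m]]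
    some ((path.zip (path.drop 1)).foldl (fun films ab =>
      films ++ (filmsOf.getD ab.1 []).filter (fun m => decide (ab.2 ∈ md.getD m []))) [])

-- ===== PRECONDITION & SPEC =====
def Spec_movies_between_actors (data : (List (Int × List Int)) × (List (Int × List Int))) (actor_id_1 : Int) (actor_id_2 : Int) (out : Option (List Int)) : Prop := out = movies_between_actors_alt data actor_id_1 actor_id_2
instance (data : (List (Int × List Int)) × (List (Int × List Int))) (actor_id_1 : Int) (actor_id_2 : Int) (out : Option (List Int)) : Decidable (Spec_movies_between_actors data actor_id_1 actor_id_2 out) := by unfold Spec_movies_between_actors; infer_instance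

-- ===== CLAIM (what is proved, stated in full; the proofs are below) =====
def Claim_equal_movies_between_actors : Prop := ∀ (data : (List (Int × List Int)) × (List (Int × List Int))) (actor_id_1 : Int) (actor_id_2 : Int), Dom_movies_between_actors data actor_id_1 actor_id_2 → Spec_movies_between_actors data actor_id_1 actor_id_2 (movies_between_actors data actor_id_1 actor_id_2)

-- ===== LEMMAS AND PROOFS =====

-- the parents dictionary built by the BFS: every stored parent is an EARLIER key
def pvInv (p : PySem.Dict Int (Option Int)) : Prop :=
  ∀ k q, p.getD k none = some q → q ∈ p.keys ∧ p.keys.idxOf q < p.keys.idxOf k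

-- the shared queue/parents step (the literal fold body of both ports' neighbour loop)
def pvStep (cur : Int) (s : List Int × PySem.Dict Int (Option Int)) (v : Int) :
    List Int × PySem.Dict Int (Option Int) :=
  if s.2.contains v then s else (s.1 ++ [v], s.2.insert v (some cur))

theorem pvInv_insert (p : PySem.Dict Int (Option Int)) (v c : Int)
    (hv : p.contains v = false) (hc : c ∈ p.keys) (hp : pvInv p) :
    pvInv (p.insert v (some c)) := by
  have hkeys : (p.insert v (some c)).keys = p.keys ++ [v] :=
    PySem.Dict.keys_insert_of_not_contains p (some c) hv
  have hvmem : v ∉ p.keys := by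
    intro h
    rw [← PySem.Dict.contains_iff_mem_keys] at h
    simp [hv] at h
  intro k q hkq
  rw [PySem.Dict.getD_insert] at hkq
  by_cases hk : k = v
  · rw [if_pos hk] at hkq
    injection hkq with hq
    subst hq
    constructor
    · rw [hkeys]; exact List.mem_append_left _ hc
    · rw [hkeys, hk, List.idxOf_append_of_mem hc, List.idxOf_append_of_notMem hvmem]
      have h1 : List.idxOf c p.keys < p.keys.length := List.idxOf_lt_length_of_mem hc
      have h2 : List.idxOf v [v] = 0 := by simp
      omega
  · rw [if_neg hk] at hkq
    obtain ⟨hq, hlt⟩ := hp k q hkq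
    have hkmem : k ∈ p.keys := by
      by_contra hkm
      have : p.contains k = false := by
        by_cases h : p.contains k
        · exact absurd ((PySem.Dict.contains_iff_mem_keys p k).mp h) hkm
        · simpa using h
      rw [PySem.Dict.getD_of_not_contains p none this] at hkq
      cases hkq
    constructor
    · rw [hkeys]; exact List.mem_append_left _ hq
    · rw [hkeys, List.idxOf_append_of_mem hq, List.idxOf_append_of_mem hkmem]
      exact hlt

-- A's backwards walk with fuel f and an accumulator = B's recursive chain, same fuel
theorem pvWalkChain (p : PySem.Dict Int (Option Int)) :
    ∀ (f : Nat) (x : Int) (acc : List Int),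
      pvAWalk p f x (x :: acc) = pvBChain p f x ++ acc := by
  intro f
  induction f with
  | zero => intro x acc; simp [pvAWalk, pvBChain]
  | succ f ih =>
    intro x acc
    show (match p.getD x none with
          | none => x :: acc
          | some q => pvAWalk p f q (q :: x :: acc)) = _
    cases h : p.getD x none with
    | none => simp [pvBChain, h]
    | some q =>
      simp only [pvBChain, h]
      rw [ih q (x :: acc)]
      simp

-- the walk does not depend on the fuel once the fuel exceeds the start key's position
theorem pvWalk_fuel (p : PySem.Dict Int (Option Int)) (hp : pvInv p) :
    ∀ (n : Nat) (x : Int), x ∈ p.keys → p.keys.idxOf x < n →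
      ∀ (f f' : Nat) (acc : List Int), n ≤ f → n ≤ f' →
        pvAWalk p f x acc = pvAWalk p f' x acc := by
  intro n
  induction n with
  | zero => intro x _ h; omega
  | succ n ih =>
    intro x hx hidx f f' acc hf hf'
    obtain ⟨a, rfl⟩ : ∃ a, f = a + 1 := ⟨f - 1, by omega⟩
    obtain ⟨b, rfl⟩ : ∃ b, f' = b + 1 := ⟨f' - 1, by omega⟩
    show (match p.getD x none with
          | none => acc | some q => pvAWalk p a q (q :: acc)) =
         (match p.getD x none with
          | none => acc | some q => pvAWalk p b q (q :: acc))
    cases h : p.getD x none with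
    | none => rfl
    | some q =>
      obtain ⟨hq, hlt⟩ := hp x q h
      exact ih q hq (by omega) a b (q :: acc) (by omega) (by omega)

-- the walk only reads keys of p: inserting fresh keys does not change it
theorem pvWalk_ext (p p' : PySem.Dict Int (Option Int))
    (hag : ∀ k, k ∈ p.keys → p'.getD k none = p.getD k none)
    (hcl : ∀ k q, p.getD k none = some q → q ∈ p.keys) :
    ∀ (f : Nat) (x : Int), x ∈ p.keys → ∀ acc, pvAWalk p' f x acc = pvAWalk p f x acc := by
  intro f
  induction f with
  | zero => intro x _ acc; rfl
  | succ f ih =>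
    intro x hx acc
    show (match p'.getD x none with
          | none => acc | some q => pvAWalk p' f q (q :: acc))
        = (match p.getD x none with
          | none => acc | some q => pvAWalk p f q (q :: acc))
    rw [hag x hx]
    cases h : p.getD x none with
    | none => rfl
    | some q =>
      simp only []
      exact ih q (hcl x q h) (q :: acc)

-- the full-fuel chain is unchanged by one fresh insert
theorem pvChain_ext (p : PySem.Dict Int (Option Int)) (x v c : Int)
    (hp : pvInv p) (hx : x ∈ p.keys) (hv : p.contains v = false) (hc : c ∈ p.keys) :
    pvBChain (p.insert v (some c)) (p.insert v (some c)).items.length x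
      = pvBChain p p.items.length x := by
  have hkeys : (p.insert v (some c)).keys = p.keys ++ [v] :=
    PySem.Dict.keys_insert_of_not_contains p (some c) hv
  have hag : ∀ k, k ∈ p.keys → (p.insert v (some c)).getD k none = p.getD k none := by
    intro k hk
    rw [PySem.Dict.getD_insert]
    have : k ≠ v := by
      intro h; subst h
      rw [← PySem.Dict.contains_iff_mem_keys] at hk
      simp [hv] at hk
    simp [this]
  have hcl : ∀ k q, p.getD k none = some q → q ∈ p.keys := fun k q h => (hp k q h).1
  have hlen : p.keys.length = p.items.length := by
    simp [PySem.Dict.keys]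
  have hlen' : (p.insert v (some c)).items.length = p.items.length + 1 := by
    rw [PySem.Dict.items_insert_of_not_contains p (some c) hv]
    simp
  have h1 : pvAWalk (p.insert v (some c)) (p.insert v (some c)).items.length x [x]
      = pvAWalk p (p.insert v (some c)).items.length x [x] :=
    pvWalk_ext p _ hag hcl _ x hx [x]
  have h2 : pvAWalk p (p.insert v (some c)).items.length x [x]
      = pvAWalk p p.items.length x [x] := by
    have hidx : p.keys.idxOf x < p.keys.length := List.idxOf_lt_length_of_mem hx
    exact pvWalk_fuel p hp p.keys.length x hx hidx _ _ [x] (by omega) (by omega)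
  have e1 := pvWalkChain (p.insert v (some c)) (p.insert v (some c)).items.length x []
  have e2 := pvWalkChain p p.items.length x []
  simp only [List.append_nil] at e1 e2
  rw [← e1, ← e2, h1, h2]

-- A's neighbour scan, when the goal IS a neighbour: its path is B's chain + goal
theorem pvScanGoal (goal cur : Int) :
    ∀ (vs q : List Int) (p : PySem.Dict Int (Option Int)),
      pvInv p → cur ∈ p.keys → goal ∈ vs →
      (pvAScan goal cur vs q p).1 = some (pvBChain p p.items.length cur ++ [goal]) := by
  intro vs
  induction vs with
  | nil => intro q p _ _ h; cases h
  | cons v vs ih =>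
    intro q p hp hcur hg
    by_cases hv : v = goal
    · subst hv
      simp only [pvAScan, if_pos rfl]
      have := pvWalkChain p p.items.length cur [v]
      simpa using this
    · have hg' : goal ∈ vs := by
        cases hg with
        | head => exact absurd rfl hv
        | tail _ h => exact h
      by_cases hc : p.contains v
      · simp only [pvAScan, if_neg hv, hc, if_pos rfl]
        exact ih q p hp hcur hg'
      · have hcf : p.contains v = false := by simpa using hc
        simp only [pvAScan, if_neg hv, hcf, Bool.false_eq_true, if_neg (by simp : ¬False)]
        rw [ih (q ++ [v]) (p.insert v (some cur)) (pvInv_insert p v cur hcf hcur hp)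
          (by rw [PySem.Dict.keys_insert_of_not_contains p (some cur) hcf]
              exact List.mem_append_left _ hcur) hg']
        rw [pvChain_ext p cur v cur hp hcur hcf hcur]

-- A's neighbour scan, when the goal is NOT a neighbour: it is the shared fold step
theorem pvScanNoGoal (goal cur : Int) :
    ∀ (vs : List Int), goal ∉ vs → ∀ (q : List Int) (p : PySem.Dict Int (Option Int)),
      pvAScan goal cur vs q p = (none, vs.foldl (pvStep cur) (q, p)) := by
  intro vs
  induction vs with
  | nil => intro _ q p; rfl
  | cons v vs ih =>
    intro hg q p
    have hv : v ≠ goal := fun h => hg (h ▸ List.mem_cons_self ..)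
    have hg' : goal ∉ vs := fun h => hg (List.mem_cons_of_mem _ h)
    by_cases hc : p.contains v
    · simp only [pvAScan, if_neg hv, hc, if_pos rfl, List.foldl_cons, pvStep, if_pos hc]
      exact ih hg' q p
    · have hcf : p.contains v = false := by simpa using hc
      simp only [pvAScan, if_neg hv, hcf, Bool.false_eq_true, if_neg (by simp : ¬False),
        List.foldl_cons, pvStep]
      exact ih hg' (q ++ [v]) (p.insert v (some cur))

-- the fold only appends to the queue: a queue prefix passes through unchanged
theorem pvFoldApp (cur : Int) :
    ∀ (vs a b : List Int) (p : PySem.Dict Int (Option Int)),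
      vs.foldl (pvStep cur) (a ++ b, p)
        = (a ++ (vs.foldl (pvStep cur) (b, p)).1, (vs.foldl (pvStep cur) (b, p)).2) := by
  intro vs
  induction vs with
  | nil => intro a b p; rfl
  | cons v vs ih =>
    intro a b p
    simp only [List.foldl_cons, pvStep]
    by_cases hc : p.contains v
    · simp only [hc, if_pos rfl]
      exact ih a b p
    · have hcf : p.contains v = false := by simpa using hc
      simp only [hcf, Bool.false_eq_true, if_neg (by simp : ¬False), List.append_assoc]
      exact ih a (b ++ [v]) (p.insert v (some cur))

-- the fold keeps the BFS invariants: parents well-founded, queue members are keys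
theorem pvFoldInv (cur : Int) :
    ∀ (vs : List Int) (s : List Int × PySem.Dict Int (Option Int)),
      pvInv s.2 → cur ∈ s.2.keys → (∀ x ∈ s.1, x ∈ s.2.keys) →
      pvInv (vs.foldl (pvStep cur) s).2 ∧
      (∀ x ∈ (vs.foldl (pvStep cur) s).1, x ∈ (vs.foldl (pvStep cur) s).2.keys) ∧
      (∀ x, x ∈ s.2.keys → x ∈ (vs.foldl (pvStep cur) s).2.keys) := by
  intro vs
  induction vs with
  | nil => intro s h1 _ h3; exact ⟨h1, h3, fun x hx => hx⟩
  | cons v vs ih =>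
    intro s h1 h2 h3
    simp only [List.foldl_cons, pvStep]
    by_cases hc : s.2.contains v
    · simp only [hc, if_pos rfl]
      exact ih s h1 h2 h3
    · have hcf : s.2.contains v = false := by simpa using hc
      simp only [hcf, Bool.false_eq_true, if_neg (by simp : ¬False)]
      have hkeys : (s.2.insert v (some cur)).keys = s.2.keys ++ [v] :=
        PySem.Dict.keys_insert_of_not_contains s.2 (some cur) hcf
      have hmono : ∀ x, x ∈ s.2.keys → x ∈ (s.2.insert v (some cur)).keys := by
        intro x hx; rw [hkeys]; exact List.mem_append_left _ hx
      have h1' : pvInv (s.2.insert v (some cur)) := pvInv_insert s.2 v cur hcf h2 h1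
      have h2' : cur ∈ (s.2.insert v (some cur)).keys := hmono cur h2
      have h3' : ∀ x ∈ s.1 ++ [v], x ∈ (s.2.insert v (some cur)).keys := by
        intro x hx
        rcases List.mem_append.mp hx with h | h
        · exact hmono x (h3 x h)
        · rw [hkeys]
          exact List.mem_append_right _ h
      obtain ⟨a, b, c⟩ := ih (s.1 ++ [v], s.2.insert v (some cur)) h1' h2' h3'
      exact ⟨a, b, fun x hx => c x (hmono x hx)⟩

-- the two BFS loops agree: A's indexed queue at index i IS B's pending list q.drop i
theorem pvBfsEq (adj : PySem.Dict Int (List Int)) (goal : Int) :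
    ∀ (f : Nat) (q : List Int) (i : Nat) (p : PySem.Dict Int (Option Int)),
      pvInv p → (∀ x ∈ q, x ∈ p.keys) → i ≤ q.length →
      pvABfs adj goal f q i p = pvBBfs adj goal f (q.drop i) p := by
  intro f
  induction f with
  | zero => intro q i p _ _ _; rfl
  | succ f ih =>
    intro q i p hp hq hi
    by_cases hlt : i < q.length
    · have hcur : q.getD i 0 = q[i] := List.getD_eq_getElem q 0 hlt
      have hdrop : q.drop i = q[i] :: q.drop (i + 1) := List.drop_eq_getElem_cons hlt
      have hcmem : q[i] ∈ p.keys := hq _ (List.getElem_mem hlt)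
      rw [hdrop]
      show (if i < q.length then
              match pvAScan goal (q.getD i 0) (adj.getD (q.getD i 0) []) q p with
              | (some path, _, _) => some path
              | (none, q', p') => pvABfs adj goal f q' (i+1) p'
            else none) = _
      rw [if_pos hlt, hcur]
      show _ = (if goal ∈ adj.getD q[i] [] then
                  some (pvBChain p p.items.length q[i] ++ [goal])
                else
                  pvBBfs adj goal f
                    ((adj.getD q[i] []).foldl (pvStep q[i]) (q.drop (i+1), p)).1
                    ((adj.getD q[i] []).foldl (pvStep q[i]) (q.drop (i+1), p)).2)
      by_cases hg : goal ∈ adj.getD q[i] []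
      · rw [if_pos hg]
        have h1 := pvScanGoal goal q[i] (adj.getD q[i] []) q p hp hcmem hg
        cases hs : pvAScan goal q[i] (adj.getD q[i] []) q p with
        | mk o st =>
          rw [hs] at h1
          simp only at h1
          subst h1
          rfl
      · rw [if_neg hg]
        rw [pvScanNoGoal goal q[i] (adj.getD q[i] []) hg q p]
        have htlen : (q.take (i+1)).length = i + 1 := by
          rw [List.length_take]; omega
        have hqfold := pvFoldApp q[i] (adj.getD q[i] []) (q.take (i+1)) (q.drop (i+1)) p
        rw [List.take_append_drop] at hqfold
        rw [hqfold]
        obtain ⟨ha, hb, hc⟩ := pvFoldInv q[i] (adj.getD q[i] []) (q.drop (i+1), p) hp hcmem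
          (fun x hx => hq x (List.mem_of_mem_drop hx))
        have ihx := ih (q.take (i+1) ++ ((adj.getD q[i] []).foldl (pvStep q[i]) (q.drop (i+1), p)).1)
          (i+1)
          ((adj.getD q[i] []).foldl (pvStep q[i]) (q.drop (i+1), p)).2
          ha
          (by
            intro x hx
            rcases List.mem_append.mp hx with h | h
            · exact hc x (hq x (List.mem_of_mem_take h))
            · exact hb x h)
          (by simp [htlen])
        have hdq : (q.take (i+1) ++ ((adj.getD q[i] []).foldl (pvStep q[i]) (q.drop (i+1), p)).1).drop (i+1)
            = ((adj.getD q[i] []).foldl (pvStep q[i]) (q.drop (i+1), p)).1 := by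
          have h0 := List.drop_left (l₁ := q.take (i+1)) (l₂ := ((adj.getD q[i] []).foldl (pvStep q[i]) (q.drop (i+1), p)).1)
          rwa [htlen] at h0
        rw [hdq] at ihx
        exact ihx
    · rw [List.drop_eq_nil_of_le (by omega)]
      show (if i < q.length then _ else none) = none
      rw [if_neg hlt]

-- the initial parents dict {start: None} is well-founded and contains the start
theorem pvInv_init (a : Int) : pvInv (PySem.Dict.ofList [(a, none)]) := by
  intro k q h
  have he : PySem.Dict.ofList [(a, (none : Option Int))] = PySem.Dict.empty.insert a none := rfl
  rw [he, PySem.Dict.getD_insert] at h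
  by_cases hk : k = a <;> simp [hk, PySem.Dict.getD_empty] at h

theorem pvKeys_init (a : Int) : (PySem.Dict.ofList [(a, (none : Option Int))]).keys = [a] := rfl

-- films_of, one movie: appending `m` once for each distinct cast member
theorem pvFilmsInner (m a : Int) :
    ∀ (s : List Int), s.Nodup → ∀ (d : PySem.Dict Int (List Int)),
      (s.foldl (fun d x => d.modify x ([] : List Int) (fun l => l ++ [m])) d).getD a []
        = d.getD a [] ++ (if a ∈ s then [m] else []) := by
  intro s
  induction s with
  | nil => intro _ d; simp
  | cons x xs ih =>
    intro hnd d
    have hx : x ∉ xs := (List.nodup_cons.mp hnd).1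
    have hnd' : xs.Nodup := (List.nodup_cons.mp hnd).2
    simp only [List.foldl_cons]
    rw [ih hnd']
    by_cases hax : a = x
    · subst hax
      rw [PySem.Dict.getD_modify_self]
      simp [hx]
    · rw [PySem.Dict.getD_modify, if_neg hax]
      by_cases haxs : a ∈ xs <;> simp [haxs, hax]

-- films_of characterisation: the movies whose cast contains `a`, in movie_data order
theorem pvFilmsOf (a : Int) :
    ∀ (items : List (Int × List Int)) (d : PySem.Dict Int (List Int)),
      (items.foldl (fun d mc =>
          (PySem.Set.ofList mc.2).foldl (fun d x => d.modify x ([] : List Int) (fun l => l ++ [mc.1])) d) d).getD a []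
        = d.getD a [] ++ (items.filter (fun mc => decide (a ∈ mc.2))).map (·.1) := by
  intro items
  induction items with
  | nil => intro d; simp
  | cons mc rest ih =>
    intro d
    simp only [List.foldl_cons]
    rw [ih]
    rw [pvFilmsInner mc.1 a _ (PySem.Set.nodup_ofList mc.2)]
    by_cases hm : a ∈ mc.2
    · simp [hm, PySem.Set.mem_ofList]
    · simp [hm, PySem.Set.mem_ofList]

-- consecutive pairs by index = zip with the tail (Nat form)
theorem pvRangeZipNat :
    ∀ (l : List Int), (List.range (l.length - 1)).map (fun i => (l.getD i 0, l.getD (i+1) 0))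
      = l.zip (l.drop 1) := by
  intro l
  induction l with
  | nil => simp
  | cons x xs ih =>
    cases xs with
    | nil => simp
    | cons y rest =>
      have h1 : (x :: y :: rest).length - 1 = ((y :: rest).length - 1) + 1 := by
        simp
      rw [h1, List.range_succ_eq_map]
      simp only [List.map_cons, List.map_map]
      rw [show (x :: y :: rest).zip ((x :: y :: rest).drop 1) = (x, y) :: (y :: rest).zip ((y :: rest).drop 1) by simp]
      rw [← ih]
      simp only [List.getD_cons_zero, List.getD_cons_succ, List.cons.injEq, true_and]
      apply List.map_congr_left
      intro i _
      simp [Function.comp, Nat.succ_eq_add_one]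

-- consecutive pairs by Python index = zip with the tail
theorem pvRangeZip :
    ∀ (l : List Int),
      (PySem.List.pyRange 0 (PySem.List.len l - 1) 1).map
          (fun i => (PySem.List.pyGetD l i 0, PySem.List.pyGetD l (i+1) 0))
        = l.zip (l.drop 1) := by
  intro l
  cases l with
  | nil => decide
  | cons x xs =>
    have hlen : PySem.List.len (x :: xs) - 1 = ((x :: xs).length - 1 : Nat) := by
      simp [PySem.List.len_eq]
    rw [hlen, PySem.List.pyRange_zero_natCast]
    rw [List.map_map, ← pvRangeZipNat (x :: xs)]
    apply List.map_congr_left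
    intro i hi
    simp only [Function.comp]
    have g1 : PySem.List.pyGetD (x :: xs) (i : Int) 0 = (x :: xs).getD i 0 :=
      PySem.List.pyGetD_natCast (x :: xs) i 0
    have g2 : PySem.List.pyGetD (x :: xs) ((i : Int)+1) 0 = (x :: xs).getD (i+1) 0 := by
      rw [show ((i : Int) + 1) = ((i+1 : Nat) : Int) by push_cast; ring]
      exact PySem.List.pyGetD_natCast (x :: xs) (i+1) 0
    rw [g1, g2]

-- A's inner movie scan appends exactly the movies containing both actors
theorem pvInnerA (md : PySem.Dict Int (List Int)) (x y : Int) (seq : List Int) :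
    md.keys.foldl (fun seq m =>
        if x ∈ md.getD m [] ∧ y ∈ md.getD m [] then seq ++ [m] else seq) seq
      = seq ++ md.keys.filter (fun m => decide (x ∈ md.getD m []) && decide (y ∈ md.getD m [])) := by
  have h := PySem.List.foldl_append_if
    (fun m => decide (x ∈ md.getD m []) && decide (y ∈ md.getD m [])) (fun m => m) md.keys seq
  simpa using h

-- per pair: A's scan over all movie keys = B's filter of the actor's indexed movie list
theorem pvPairEq (raw : List (Int × List Int)) (x y : Int) :
    (PySem.Dict.ofList raw).keys.filter
        (fun m => decide (x ∈ (PySem.Dict.ofList raw).getD m []) && decide (y ∈ (PySem.Dict.ofList raw).getD m []))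
      = (((PySem.Dict.ofList raw).items.filter (fun mc => decide (x ∈ mc.2))).map (·.1)).filter
          (fun m => decide (y ∈ (PySem.Dict.ofList raw).getD m [])) := by
  set md := PySem.Dict.ofList raw with hmd
  have hnd : md.keys.Nodup := PySem.Dict.nodup_keys_ofList raw
  have hgetD : ∀ mc ∈ md.items, md.getD mc.1 [] = mc.2 := by
    intro mc hmc
    exact PySem.Dict.getD_of_mem_items md (by simpa using hmc) hnd []
  rw [List.filter_map, List.filter_filter]
  have hkeys : md.keys = md.items.map (·.1) := rfl
  rw [hkeys, List.filter_map]
  congr 1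
  apply List.filter_congr
  intro mc hmc
  simp [Function.comp, hgetD mc hmc, Bool.and_comm]

-- the whole movie phase agrees on any path
theorem pvMoviePhase (raw : List (Int × List Int)) (path : List Int) :
    (PySem.List.pyRange 0 (PySem.List.len path - 1) 1).foldl (fun seq i =>
        (PySem.Dict.ofList raw).keys.foldl (fun seq m =>
          if PySem.List.pyGetD path i 0 ∈ (PySem.Dict.ofList raw).getD m [] ∧
             PySem.List.pyGetD path (i+1) 0 ∈ (PySem.Dict.ofList raw).getD m []
          then seq ++ [m] else seq) seq) []
      = (path.zip (path.drop 1)).foldl (fun films ab =>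
          films ++ (((PySem.Dict.ofList raw).items.foldl (fun d mc =>
              (PySem.Set.ofList mc.2).foldl (fun d x => d.modify x ([] : List Int) (fun l => l ++ [mc.1])) d)
              PySem.Dict.empty).getD ab.1 []).filter
            (fun m => decide (ab.2 ∈ (PySem.Dict.ofList raw).getD m []))) [] := by
  set md := PySem.Dict.ofList raw with hmd
  have hfo : ∀ a : Int,
      ((md.items.foldl (fun d mc =>
          (PySem.Set.ofList mc.2).foldl (fun d x => d.modify x ([] : List Int) (fun l => l ++ [mc.1])) d)
          PySem.Dict.empty).getD a [])
        = (md.items.filter (fun mc => decide (a ∈ mc.2))).map (·.1) := by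
    intro a
    rw [pvFilmsOf a md.items PySem.Dict.empty]
    simp [PySem.Dict.getD_empty]
  simp only [pvInnerA, hfo]
  rw [PySem.List.foldl_append_eq_flatMap, PySem.List.foldl_append_eq_flatMap]
  simp only [List.nil_append]
  have : (PySem.List.pyRange 0 (PySem.List.len path - 1) 1).flatMap
      (fun i => md.keys.filter (fun m =>
        decide (PySem.List.pyGetD path i 0 ∈ md.getD m []) && decide (PySem.List.pyGetD path (i+1) 0 ∈ md.getD m [])))
      = ((PySem.List.pyRange 0 (PySem.List.len path - 1) 1).map
          (fun i => (PySem.List.pyGetD path i 0, PySem.List.pyGetD path (i+1) 0))).flatMap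
        (fun ab => md.keys.filter (fun m =>
          decide (ab.1 ∈ md.getD m []) && decide (ab.2 ∈ md.getD m []))) := by
    rw [List.flatMap_map]
  rw [this, pvRangeZip]
  apply List.flatMap_congr
  intro ab _
  rw [pvPairEq raw ab.1 ab.2, ← hmd]

-- the two ports agree on EVERY input (both read the sets in one and the same list order)
theorem pvMain_eq (data : (List (Int × List Int)) × (List (Int × List Int))) (a1 a2 : Int) :
    movies_between_actors data a1 a2 = movies_between_actors_alt data a1 a2 := by
  unfold movies_between_actors movies_between_actors_alt pvBBfsPath
  simp only []
  have hpath : (if a1 = a2 then some [a1]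
      else pvABfs (PySem.Dict.ofList data.1) a2
        ((PySem.Dict.ofList data.1).values.foldl (fun n l => n + l.length) 2) [a1] 0
        (PySem.Dict.ofList [(a1, none)]))
    = (if a2 = a1 then some [a1]
      else pvBBfs (PySem.Dict.ofList data.1) a2
        ((PySem.Dict.ofList data.1).values.foldl (fun n l => n + l.length) 2) [a1]
        (PySem.Dict.ofList [(a1, none)])) := by
    by_cases h : a1 = a2
    · simp [h]
    · rw [if_neg h, if_neg (Ne.symm h)]
      have := pvBfsEq (PySem.Dict.ofList data.1) a2
        ((PySem.Dict.ofList data.1).values.foldl (fun n l => n + l.length) 2) [a1] 0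
        (PySem.Dict.ofList [(a1, none)]) (pvInv_init a1)
        (by intro x hx; rw [pvKeys_init a1]; simpa using hx) (by simp)
      simpa using this
  rw [hpath]
  cases hb : (if a2 = a1 then some [a1]
      else pvBBfs (PySem.Dict.ofList data.1) a2
        ((PySem.Dict.ofList data.1).values.foldl (fun n l => n + l.length) 2) [a1]
        (PySem.Dict.ofList [(a1, none)])) with
  | none => rfl
  | some path => simpa using pvMoviePhase data.2 path

-- ===== VERDICT (by name: the statement is the Claim_ definition above) =====
theorem movies_between_actors_spec : Claim_equal_movies_between_actors := by
  intro data a1 a2 _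
  exact pvMain_eq data a1 a2
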